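-- pv_equiv track=rewrite | github.com/jstaples1/python_practice | general_practice/hangman/hangman.py | build_body_parts
-- ===== SOURCE A (Python) =====
-- def build_body_parts(number):
--     body_parts = ["   O","  /-","\ ","   |","  / \ "]
--     parts = []
--     i = 0
--
--     while i < len(body_parts):
--         if i < int(number):
--             parts.append(body_parts[i])
--         else:
--             parts.append("")
--         i = i + 1
--
--     return parts
-- ===== SOURCE B (Python) =====
-- def build_body_parts(number):
--     body_parts = ["   O","  /-","\ ","   |","  / \ "]
--     n = max(0, int(number))
--     def go(ps):
--         if len(ps) <= n:
--             return ps
--         return go(ps[:-1]) + [""]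
--     return go(body_parts)
-- ===== Notes on version B (the rewrite author's own statement) =====
-- stated objective: alternative
-- what changed: Replaces A's forward index loop with a per-index kept/blank branch by a recursion that peels elements off the END of the parts list one at a time, replacing each with an empty string, until the remaining prefix fits under the clamped count; the output is built back-to-front with no index variable or per-index branch.
import Mathlib
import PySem

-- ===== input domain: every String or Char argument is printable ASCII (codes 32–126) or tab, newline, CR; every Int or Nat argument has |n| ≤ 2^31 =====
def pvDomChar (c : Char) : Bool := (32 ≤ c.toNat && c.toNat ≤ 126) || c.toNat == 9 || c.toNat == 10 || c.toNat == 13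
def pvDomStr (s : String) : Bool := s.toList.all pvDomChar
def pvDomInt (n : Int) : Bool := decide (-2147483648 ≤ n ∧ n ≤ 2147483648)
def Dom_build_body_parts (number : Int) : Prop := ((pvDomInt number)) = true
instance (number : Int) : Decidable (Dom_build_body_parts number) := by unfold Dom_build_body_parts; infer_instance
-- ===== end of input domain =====

-- B replaces A's forward index loop (branching on i < number at each index) by a recursion
-- that peels elements off the END of the list, blanking each, until the kept prefix fits
-- under the clamped count (objective: alternative decomposition, built back-to-front).

-- ===== PORT A =====
def build_body_parts (number : Int) : List String :=
  let body_parts : List String := ["   O", "  /-", "\\ ", "   |", "  / \\ "]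
  (PySem.List.pyRange 0 (body_parts.length : Int) 1).foldl
    (fun parts i =>
      if i < number then parts ++ [(PySem.List.pyGet? body_parts i).getD ""]
      else parts ++ [""])
    []

-- ===== PORT B =====
-- helper: go(ps) from Source B; recursion on ps.length (ps[:-1] = ps.dropLast)
def bbpGo (n : Nat) (ps : List String) : List String :=
  if ps.length ≤ n then ps
  else bbpGo n ps.dropLast ++ [""]
termination_by ps.length
decreasing_by simp [List.length_dropLast]; omega

def build_body_parts_alt (number : Int) : List String :=
  let body_parts : List String := ["   O", "  /-", "\\ ", "   |", "  / \\ "]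
  let n : Nat := (max 0 number).toNat
  bbpGo n body_parts

-- ===== PRECONDITION & SPEC =====
def Spec_build_body_parts (number : Int) (out : List String) : Prop := out = build_body_parts_alt number
instance (number : Int) (out : List String) : Decidable (Spec_build_body_parts number out) := by unfold Spec_build_body_parts; infer_instance

-- ===== CLAIM (what is proved, stated in full; the proofs are below) =====
def Claim_equal_build_body_parts : Prop := ∀ (number : Int), Dom_build_body_parts number → Spec_build_body_parts number (build_body_parts number)

-- ===== LEMMAS AND PROOFS =====

-- ===== VERDICT (by name: the statement is the Claim_ definition above) =====
theorem build_body_parts_spec : Claim_equal_build_body_parts := by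
  intro number _
  unfold Spec_build_body_parts build_body_parts build_body_parts_alt
  norm_num [PySem.List.pyRange]
  rcases (show number ≤ 0 ∨ number = 1 ∨ number = 2 ∨ number = 3 ∨ number = 4 ∨ 5 ≤ number by omega)
    with h | h | h | h | h | h
  · have hn : (max 0 number).toNat = 0 := by omega
    rw [hn]
    simp [List.range_succ, PySem.List.pyGet?, PySem.List.pyIdx?, bbpGo,
      (show ¬(0:Int) < number by omega), (show ¬(1:Int) < number by omega), (show ¬(2:Int) < number by omega), (show ¬(3:Int) < number by omega), (show ¬(4:Int) < number by omega)]
  · subst h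
    simp [List.range_succ, PySem.List.pyGet?, PySem.List.pyIdx?, bbpGo]
  · subst h
    simp [List.range_succ, PySem.List.pyGet?, PySem.List.pyIdx?, bbpGo]
  · subst h
    simp [List.range_succ, PySem.List.pyGet?, PySem.List.pyIdx?, bbpGo]
  · subst h
    simp [List.range_succ, PySem.List.pyGet?, PySem.List.pyIdx?, bbpGo]
  · have hn : (5:Nat) ≤ (max 0 number).toNat := by omega
    simp [List.range_succ, PySem.List.pyGet?, PySem.List.pyIdx?, bbpGo, hn,
      (show (0:Int) < number by omega), (show (1:Int) < number by omega), (show (2:Int) < number by omega), (show (3:Int) < number by omega), (show (4:Int) < number by omega)]
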